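-- pv_equiv track=rewrite | github.com/19rehan/scholarpath | scraper_official.py | detect_country
-- ===== SOURCE A (Python) =====
-- def detect_country(domain, text=""):
--     tld_map = {
--         '.ac.uk':'United Kingdom','.co.uk':'United Kingdom','.uk':'United Kingdom',
--         '.edu.au':'Australia','.com.au':'Australia','.au':'Australia',
--         '.ca':'Canada','.de':'Germany','.fr':'France','.nl':'Netherlands',
--         '.se':'Sweden','.no':'Norway','.fi':'Finland','.dk':'Denmark',
--         '.ch':'Switzerland','.at':'Austria','.be':'Belgium','.it':'Italy',
--         '.es':'Spain','.pt':'Portugal','.pl':'Poland','.cz':'Czech Republic',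
--         '.hu':'Hungary','.ro':'Romania','.tr':'Turkey','.sa':'Saudi Arabia',
--         '.ae':'UAE','.qa':'Qatar','.jo':'Jordan','.kw':'Kuwait',
--         '.cn':'China','.jp':'Japan','.kr':'South Korea','.my':'Malaysia',
--         '.sg':'Singapore','.th':'Thailand','.id':'Indonesia','.vn':'Vietnam',
--         '.tw':'Taiwan','.hk':'Hong Kong','.nz':'New Zealand',
--         '.za':'South Africa','.eg':'Egypt','.ma':'Morocco','.ng':'Nigeria',
--         '.br':'Brazil','.mx':'Mexico','.ar':'Argentina',
--         '.ru':'Russia','.kz':'Kazakhstan','.pk':'Pakistan','.in':'India',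
--         '.bd':'Bangladesh','.lk':'Sri Lanka','.np':'Nepal',
--         '.edu':'USA','.gov':'USA','.org':'International',
--     }
--     for tld, country in sorted(tld_map.items(), key=lambda x: -len(x[0])):
--         if domain.endswith(tld):
--             return country
--     hints = {
--         'germany':'Germany','united kingdom':'United Kingdom','uk ':'United Kingdom',
--         'australia':'Australia','canada':'Canada','japan':'Japan','china':'China',
--         'korea':'South Korea','turkey':'Turkey','france':'France',
--         'netherlands':'Netherlands','sweden':'Sweden','norway':'Norway',
--         'usa':'USA','united states':'USA','saudi arabia':'Saudi Arabia',
--         'malaysia':'Malaysia','singapore':'Singapore','italy':'Italy',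
--         'russia':'Russia','indonesia':'Indonesia','vietnam':'Vietnam',
--         'brazil':'Brazil','egypt':'Egypt','pakistan':'Pakistan',
--     }
--     for hint, country in hints.items():
--         if hint in text.lower()[:2000]:
--             return country
--     return "International"
-- ===== SOURCE B (Python) =====
-- # B: scan the domain once; at each '.' look the rest of the string up in a
-- # dict keyed by the TLD *without* its leading dot (first hit = longest match);
-- # hints resolved with next() over a tuple of pairs on a precomputed snippet.
-- _TLD = {
--     'ac.uk': 'United Kingdom', 'co.uk': 'United Kingdom', 'uk': 'United Kingdom',
--     'edu.au': 'Australia', 'com.au': 'Australia', 'au': 'Australia',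
--     'ca': 'Canada', 'de': 'Germany', 'fr': 'France', 'nl': 'Netherlands',
--     'se': 'Sweden', 'no': 'Norway', 'fi': 'Finland', 'dk': 'Denmark',
--     'ch': 'Switzerland', 'at': 'Austria', 'be': 'Belgium', 'it': 'Italy',
--     'es': 'Spain', 'pt': 'Portugal', 'pl': 'Poland', 'cz': 'Czech Republic',
--     'hu': 'Hungary', 'ro': 'Romania', 'tr': 'Turkey', 'sa': 'Saudi Arabia',
--     'ae': 'UAE', 'qa': 'Qatar', 'jo': 'Jordan', 'kw': 'Kuwait',
--     'cn': 'China', 'jp': 'Japan', 'kr': 'South Korea', 'my': 'Malaysia',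
--     'sg': 'Singapore', 'th': 'Thailand', 'id': 'Indonesia', 'vn': 'Vietnam',
--     'tw': 'Taiwan', 'hk': 'Hong Kong', 'nz': 'New Zealand',
--     'za': 'South Africa', 'eg': 'Egypt', 'ma': 'Morocco', 'ng': 'Nigeria',
--     'br': 'Brazil', 'mx': 'Mexico', 'ar': 'Argentina',
--     'ru': 'Russia', 'kz': 'Kazakhstan', 'pk': 'Pakistan', 'in': 'India',
--     'bd': 'Bangladesh', 'lk': 'Sri Lanka', 'np': 'Nepal',
--     'edu': 'USA', 'gov': 'USA', 'org': 'International',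
-- }
--
-- _HINTS = (
--     ('germany', 'Germany'), ('united kingdom', 'United Kingdom'),
--     ('uk ', 'United Kingdom'), ('australia', 'Australia'),
--     ('canada', 'Canada'), ('japan', 'Japan'), ('china', 'China'),
--     ('korea', 'South Korea'), ('turkey', 'Turkey'), ('france', 'France'),
--     ('netherlands', 'Netherlands'), ('sweden', 'Sweden'), ('norway', 'Norway'),
--     ('usa', 'USA'), ('united states', 'USA'),
--     ('saudi arabia', 'Saudi Arabia'), ('malaysia', 'Malaysia'),
--     ('singapore', 'Singapore'), ('italy', 'Italy'), ('russia', 'Russia'),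
--     ('indonesia', 'Indonesia'), ('vietnam', 'Vietnam'), ('brazil', 'Brazil'),
--     ('egypt', 'Egypt'), ('pakistan', 'Pakistan'),
-- )
--
--
-- def detect_country(domain, text=""):
--     suf = domain
--     while suf:
--         if suf[0] == '.':
--             country = _TLD.get(suf[1:])
--             if country is not None:
--                 return country
--         suf = suf[1:]
--     snippet = text.lower()[:2000]
--     return next((country for hint, country in _HINTS if hint in snippet),
--                 "International")
-- ===== Notes on version B (the rewrite author's own statement) =====
-- stated objective: alternative
-- what changed: The TLD phase no longer scans the 58-entry table sorted by descending key length testing endswith for each entry; B walks the domain once and, at each dot, looks the remainder up in a dict keyed by the dot-less TLD, so the first hit is automatically the longest matching TLD; the hints phase becomes a find-first (next over a generator) on a tuple of pairs against a snippet computed once instead of per iteration.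
import Mathlib
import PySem

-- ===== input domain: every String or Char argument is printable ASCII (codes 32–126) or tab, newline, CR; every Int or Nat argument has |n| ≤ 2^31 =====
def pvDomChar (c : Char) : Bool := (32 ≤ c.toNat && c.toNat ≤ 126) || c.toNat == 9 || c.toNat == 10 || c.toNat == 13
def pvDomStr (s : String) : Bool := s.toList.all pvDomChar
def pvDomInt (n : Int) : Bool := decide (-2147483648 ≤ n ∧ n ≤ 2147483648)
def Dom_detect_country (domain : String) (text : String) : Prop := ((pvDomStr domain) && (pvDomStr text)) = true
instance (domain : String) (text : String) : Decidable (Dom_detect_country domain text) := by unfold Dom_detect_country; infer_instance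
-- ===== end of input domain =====

-- B drops A's scan over the length-sorted TLD table: it walks the domain once and, at each dot,
-- resolves the rest of the string through a lookup function keyed by the dot-less TLD; the first
-- hit is automatically the longest match, and the hints pass becomes a find-first over pairs
-- on a precomputed snippet (objective: alternative decomposition; not claimed faster).

-- ===== PORT A =====
-- A's TLD dict literal (dotted keys, insertion order)
def pvTldPairs : List (List Char × String) := [
  (".ac.uk".toList, "United Kingdom"),
  (".co.uk".toList, "United Kingdom"),
  (".uk".toList, "United Kingdom"),
  (".edu.au".toList, "Australia"),
  (".com.au".toList, "Australia"),
  (".au".toList, "Australia"),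
  (".ca".toList, "Canada"),
  (".de".toList, "Germany"),
  (".fr".toList, "France"),
  (".nl".toList, "Netherlands"),
  (".se".toList, "Sweden"),
  (".no".toList, "Norway"),
  (".fi".toList, "Finland"),
  (".dk".toList, "Denmark"),
  (".ch".toList, "Switzerland"),
  (".at".toList, "Austria"),
  (".be".toList, "Belgium"),
  (".it".toList, "Italy"),
  (".es".toList, "Spain"),
  (".pt".toList, "Portugal"),
  (".pl".toList, "Poland"),
  (".cz".toList, "Czech Republic"),
  (".hu".toList, "Hungary"),
  (".ro".toList, "Romania"),
  (".tr".toList, "Turkey"),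
  (".sa".toList, "Saudi Arabia"),
  (".ae".toList, "UAE"),
  (".qa".toList, "Qatar"),
  (".jo".toList, "Jordan"),
  (".kw".toList, "Kuwait"),
  (".cn".toList, "China"),
  (".jp".toList, "Japan"),
  (".kr".toList, "South Korea"),
  (".my".toList, "Malaysia"),
  (".sg".toList, "Singapore"),
  (".th".toList, "Thailand"),
  (".id".toList, "Indonesia"),
  (".vn".toList, "Vietnam"),
  (".tw".toList, "Taiwan"),
  (".hk".toList, "Hong Kong"),
  (".nz".toList, "New Zealand"),
  (".za".toList, "South Africa"),
  (".eg".toList, "Egypt"),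
  (".ma".toList, "Morocco"),
  (".ng".toList, "Nigeria"),
  (".br".toList, "Brazil"),
  (".mx".toList, "Mexico"),
  (".ar".toList, "Argentina"),
  (".ru".toList, "Russia"),
  (".kz".toList, "Kazakhstan"),
  (".pk".toList, "Pakistan"),
  (".in".toList, "India"),
  (".bd".toList, "Bangladesh"),
  (".lk".toList, "Sri Lanka"),
  (".np".toList, "Nepal"),
  (".edu".toList, "USA"),
  (".gov".toList, "USA"),
  (".org".toList, "International")]

def pvTldDict : PySem.Dict (List Char) String := PySem.Dict.ofList pvTldPairs

-- A's hints dict literal (insertion order)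
def pvHintPairs : List (List Char × String) := [
  ("germany".toList, "Germany"),
  ("united kingdom".toList, "United Kingdom"),
  ("uk ".toList, "United Kingdom"),
  ("australia".toList, "Australia"),
  ("canada".toList, "Canada"),
  ("japan".toList, "Japan"),
  ("china".toList, "China"),
  ("korea".toList, "South Korea"),
  ("turkey".toList, "Turkey"),
  ("france".toList, "France"),
  ("netherlands".toList, "Netherlands"),
  ("sweden".toList, "Sweden"),
  ("norway".toList, "Norway"),
  ("usa".toList, "USA"),
  ("united states".toList, "USA"),
  ("saudi arabia".toList, "Saudi Arabia"),
  ("malaysia".toList, "Malaysia"),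
  ("singapore".toList, "Singapore"),
  ("italy".toList, "Italy"),
  ("russia".toList, "Russia"),
  ("indonesia".toList, "Indonesia"),
  ("vietnam".toList, "Vietnam"),
  ("brazil".toList, "Brazil"),
  ("egypt".toList, "Egypt"),
  ("pakistan".toList, "Pakistan")]

-- A's first loop: 'for tld, country in sorted(...): if domain.endswith(tld): return country'
def pvFindTldA (d : List Char) : List (List Char × String) → Option String
  | [] => none
  | (tld, country) :: rest =>
    if PySem.Chars.endswith d tld then some country else pvFindTldA d rest

-- A's second loop: 'for hint, country in hints.items(): if hint in text.lower()[:2000]: return country'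
-- (A recomputes text.lower()[:2000] on every iteration; so does this helper)
def pvFindHintA (text : String) : List (List Char × String) → Option String
  | [] => none
  | (hint, country) :: rest =>
    if PySem.Chars.isIn hint (PySem.Chars.slice (PySem.Chars.lower text.toList) none (some 2000))
    then some country else pvFindHintA text rest

def detect_country (domain : String) (text : String) : String :=
  match pvFindTldA domain.toList
      (PySem.List.sorted pvTldDict.items (fun x => -(x.1.length : Int)) false) with
  | some country => country
  | none =>
    match pvFindHintA text pvHintPairs with
    | some country => country
    | none => "International"

-- ===== PORT B =====
-- B's _TLD dict: keys are the TLDs WITHOUT their leading dot (char lists)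
def pvTldB : PySem.Dict (List Char) String := PySem.Dict.ofList [
  (['a','c','.','u','k'], "United Kingdom"),
  (['c','o','.','u','k'], "United Kingdom"),
  (['u','k'], "United Kingdom"),
  (['e','d','u','.','a','u'], "Australia"),
  (['c','o','m','.','a','u'], "Australia"),
  (['a','u'], "Australia"),
  (['c','a'], "Canada"),
  (['d','e'], "Germany"),
  (['f','r'], "France"),
  (['n','l'], "Netherlands"),
  (['s','e'], "Sweden"),
  (['n','o'], "Norway"),
  (['f','i'], "Finland"),
  (['d','k'], "Denmark"),
  (['c','h'], "Switzerland"),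
  (['a','t'], "Austria"),
  (['b','e'], "Belgium"),
  (['i','t'], "Italy"),
  (['e','s'], "Spain"),
  (['p','t'], "Portugal"),
  (['p','l'], "Poland"),
  (['c','z'], "Czech Republic"),
  (['h','u'], "Hungary"),
  (['r','o'], "Romania"),
  (['t','r'], "Turkey"),
  (['s','a'], "Saudi Arabia"),
  (['a','e'], "UAE"),
  (['q','a'], "Qatar"),
  (['j','o'], "Jordan"),
  (['k','w'], "Kuwait"),
  (['c','n'], "China"),
  (['j','p'], "Japan"),
  (['k','r'], "South Korea"),
  (['m','y'], "Malaysia"),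
  (['s','g'], "Singapore"),
  (['t','h'], "Thailand"),
  (['i','d'], "Indonesia"),
  (['v','n'], "Vietnam"),
  (['t','w'], "Taiwan"),
  (['h','k'], "Hong Kong"),
  (['n','z'], "New Zealand"),
  (['z','a'], "South Africa"),
  (['e','g'], "Egypt"),
  (['m','a'], "Morocco"),
  (['n','g'], "Nigeria"),
  (['b','r'], "Brazil"),
  (['m','x'], "Mexico"),
  (['a','r'], "Argentina"),
  (['r','u'], "Russia"),
  (['k','z'], "Kazakhstan"),
  (['p','k'], "Pakistan"),
  (['i','n'], "India"),
  (['b','d'], "Bangladesh"),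
  (['l','k'], "Sri Lanka"),
  (['n','p'], "Nepal"),
  (['e','d','u'], "USA"),
  (['g','o','v'], "USA"),
  (['o','r','g'], "International")]

-- B's while loop: 'while suf: if suf[0]=='.': c = _TLD.get(suf[1:]); if c is not None: return c; suf = suf[1:]'
def pvScanTldB (m : PySem.Dict (List Char) String) : List Char → Option String
  | [] => none
  | c :: rest =>
    if c = '.' then
      match m.get? rest with
      | some v => some v
      | none => pvScanTldB m rest
    else pvScanTldB m rest

-- B's _HINTS tuple of pairs
def pvHintList : List (String × String) := [
  ("germany", "Germany"), ("united kingdom", "United Kingdom"),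
  ("uk ", "United Kingdom"), ("australia", "Australia"),
  ("canada", "Canada"), ("japan", "Japan"), ("china", "China"),
  ("korea", "South Korea"), ("turkey", "Turkey"), ("france", "France"),
  ("netherlands", "Netherlands"), ("sweden", "Sweden"), ("norway", "Norway"),
  ("usa", "USA"), ("united states", "USA"),
  ("saudi arabia", "Saudi Arabia"), ("malaysia", "Malaysia"),
  ("singapore", "Singapore"), ("italy", "Italy"), ("russia", "Russia"),
  ("indonesia", "Indonesia"), ("vietnam", "Vietnam"), ("brazil", "Brazil"),
  ("egypt", "Egypt"), ("pakistan", "Pakistan")]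

-- B's 'next((country for hint, country in _HINTS if hint in snippet), "International")'
def pvHintFirst (snippet : String) : Option (String × String) :=
  pvHintList.find? (fun p => PySem.Str.isIn p.1 snippet)

def detect_country_alt (domain : String) (text : String) : String :=
  match pvScanTldB pvTldB domain.toList with
  | some country => country
  | none =>
    match pvHintFirst (PySem.Str.slice (PySem.Str.lower text) none (some 2000)) with
    | some p => p.2
    | none => "International"

-- ===== PRECONDITION & SPEC =====
def Spec_detect_country (domain : String) (text : String) (out : String) : Prop := out = detect_country_alt domain text
instance (domain : String) (text : String) (out : String) : Decidable (Spec_detect_country domain text out) := by unfold Spec_detect_country; infer_instance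

-- ===== CLAIM (what is proved, stated in full; the proofs are below) =====
def Claim_equal_detect_country : Prop := ∀ (domain : String) (text : String), Dom_detect_country domain text → Spec_detect_country domain text (detect_country domain text)

-- ===== LEMMAS AND PROOFS =====
set_option maxRecDepth 65536
set_option maxHeartbeats 2000000

-- the sorted table A scans: a permutation of the items, pairwise descending key length
theorem pv_items_eq : pvTldDict.items = pvTldPairs := by decide

theorem pv_keys_nodup : (pvTldPairs.map (fun p => p.1)).Nodup := by decide

theorem pv_keys_dot : ∀ p ∈ pvTldPairs, p.1.head? = some '.' := by decide

-- B's dot-less dict read agrees with A's dict read at the dotted key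
theorem pv_get_cons_dot (L : List (List Char × String)) (s : List Char) :
    (PySem.Dict.mk (L.map (fun p => ('.' :: p.1, p.2)))).get? ('.' :: s)
      = (PySem.Dict.mk L).get? s := by
  induction L with
  | nil => rfl
  | cons p rest ih =>
    obtain ⟨k, v⟩ := p
    simp only [List.map_cons, PySem.Dict.get?_mk_cons, ih]
    have hck : (('.' :: k) == ('.' :: s)) = (k == s) := by
      simp [List.cons_beq_cons]
    rw [hck]

theorem pvTldB_get (s : List Char) : pvTldB.get? s = pvTldDict.get? ('.' :: s) := by
  have e1 : pvTldDict = PySem.Dict.mk (pvTldB.items.map (fun p => ('.' :: p.1, p.2))) := by decide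
  have e2 : PySem.Dict.mk pvTldB.items = pvTldB := by decide
  rw [e1, pv_get_cons_dot, e2]

-- A's loop returns the entry of the table whose key is d itself, when the table is
-- length-descending with nodup keys and (d, v) is an entry: no longer key can match first.
theorem pvFindTldA_of_mem (d : List Char) (L : List (List Char × String))
    (hpw : L.Pairwise (fun a b => b.1.length ≤ a.1.length))
    (hnd : (L.map (fun p => p.1)).Nodup)
    (v : String) (hm : (d, v) ∈ L) :
    pvFindTldA d L = some v := by
  induction L with
  | nil => cases hm
  | cons p rest ih =>
    obtain ⟨t, w⟩ := p
    rcases List.mem_cons.mp hm with heq | hmem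
    · obtain ⟨rfl, rfl⟩ := Prod.mk.injEq .. ▸ heq
      simp [pvFindTldA, (PySem.Chars.endswith_iff d d).mpr (List.suffix_refl d)]
    · have hpw' := List.pairwise_cons.mp hpw
      have hnd' := List.nodup_cons.mp hnd
      have hE : PySem.Chars.endswith d t = false := by
        by_cases h : PySem.Chars.endswith d t = true
        · exfalso
          have hsuf : t <:+ d := (PySem.Chars.endswith_iff d t).mp h
          have hlen : d.length ≤ t.length := hpw'.1 (d, v) hmem
          have htd : t = d := hsuf.eq_of_length (le_antisymm hsuf.length_le hlen)
          exact hnd'.1 (htd ▸ List.mem_map.mpr ⟨(d, v), hmem, rfl⟩)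
        · exact Bool.eq_false_iff.mpr h
      rw [pvFindTldA, if_neg (by simp [hE]), ih hpw'.2 hnd'.2 hmem]

-- changing d by one leading char changes nothing unless d itself is a key
theorem pvFindTldA_congr (d d' : List Char) (L : List (List Char × String))
    (h : ∀ p ∈ L, PySem.Chars.endswith d p.1 = PySem.Chars.endswith d' p.1) :
    pvFindTldA d L = pvFindTldA d' L := by
  induction L with
  | nil => rfl
  | cons p rest ih =>
    obtain ⟨t, w⟩ := p
    simp only [pvFindTldA, h (t, w) (List.mem_cons_self ..)]
    split
    · rfl
    · exact ih (fun q hq => h q (List.mem_cons_of_mem _ hq))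

-- core equivalence of the two TLD phases
theorem pv_tld_eq (d : List Char) :
    pvFindTldA d (PySem.List.sorted pvTldDict.items (fun x => -(x.1.length : Int)) false)
      = pvScanTldB pvTldB d := by
  have hperm : (PySem.List.sorted pvTldDict.items (fun x => -(x.1.length : Int)) false).Perm
      pvTldDict.items := PySem.List.sorted_perm _ _ _
  induction d with
  | nil => decide
  | cons c rest ih =>
    cases hg : pvTldDict.get? (c :: rest) with
    | some v =>
      have hmemI : ((c :: rest), v) ∈ pvTldDict.items :=
        PySem.Dict.mem_items_of_get?_eq_some _ hg
      have hdot : c = '.' := by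
        have := pv_keys_dot ((c :: rest), v) (pv_items_eq ▸ hmemI)
        simpa using this
      have hL : pvFindTldA (c :: rest)
          (PySem.List.sorted pvTldDict.items (fun x => -(x.1.length : Int)) false) = some v := by
        refine pvFindTldA_of_mem _ _ ?_ ?_ v (hperm.mem_iff.mpr hmemI)
        · exact (PySem.List.sorted_pairwise pvTldDict.items (fun x => -(x.1.length : Int))).imp
            (fun h => by exact_mod_cast neg_le_neg_iff.mp h)
        · exact ((hperm.map (fun p => p.1)).nodup_iff).mpr (pv_items_eq ▸ pv_keys_nodup)
      rw [hL, pvScanTldB, if_pos hdot, pvTldB_get, ← hdot, hg]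
    | none =>
      have hkey : (c :: rest) ∉ pvTldDict.keys :=
        (PySem.Dict.get?_eq_none_iff_not_mem_keys _ _).mp hg
      have hcongr : pvFindTldA (c :: rest)
            (PySem.List.sorted pvTldDict.items (fun x => -(x.1.length : Int)) false)
          = pvFindTldA rest
            (PySem.List.sorted pvTldDict.items (fun x => -(x.1.length : Int)) false) := by
        refine pvFindTldA_congr _ _ _ (fun p hp => ?_)
        have hpne : p.1 ≠ c :: rest := by
          intro hEq
          exact hkey (hEq ▸ PySem.Dict.mem_keys_of_mem_items _ (hperm.mem_iff.mp hp))
        rw [Bool.eq_iff_iff, PySem.Chars.endswith_iff, PySem.Chars.endswith_iff,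
          List.suffix_cons_iff]
        exact ⟨fun h => h.resolve_left hpne, Or.inr⟩
      rw [hcongr, ih]
      rw [pvScanTldB]
      split
      · next hdot =>
        rw [pvTldB_get, ← hdot, hg]
      · rfl

-- the two hint passes agree: A's per-iteration recomputed snippet loop over char-list
-- pairs vs B's find-first over string pairs on the precomputed snippet
theorem pv_hint_eq_gen (text : String) (L : List (String × String)) :
    pvFindHintA text (L.map (fun p => (p.1.toList, p.2)))
      = (L.find? (fun p =>
          PySem.Str.isIn p.1 (PySem.Str.slice (PySem.Str.lower text) none (some 2000)))).map
          (fun p => p.2) := by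
  induction L with
  | nil => rfl
  | cons p rest ih =>
    have hb : PySem.Chars.isIn p.1.toList
        (PySem.Chars.slice (PySem.Chars.lower text.toList) none (some 2000))
        = PySem.Str.isIn p.1 (PySem.Str.slice (PySem.Str.lower text) none (some 2000)) := by
      simp [PySem.Str.isIn]
    simp only [List.map_cons, pvFindHintA, List.find?_cons, hb]
    cases hc : PySem.Str.isIn p.1 (PySem.Str.slice (PySem.Str.lower text) none (some 2000)) with
    | true => simp
    | false => simp [ih]

theorem pv_hint_pairs : pvHintPairs = pvHintList.map (fun p => (p.1.toList, p.2)) := by decide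

theorem pvHintFirst_def (s : String) :
    pvHintFirst s = pvHintList.find? (fun p => PySem.Str.isIn p.1 s) := rfl

-- the whole second phase (hints + default) agrees
theorem pv_phase2 (text : String) :
    (match pvFindHintA text pvHintPairs with
     | some country => country
     | none => "International")
      = (match pvHintFirst (PySem.Str.slice (PySem.Str.lower text) none (some 2000)) with
         | some p => p.2
         | none => "International") := by
  rw [pv_hint_pairs, pv_hint_eq_gen, ← pvHintFirst_def]
  cases pvHintFirst (PySem.Str.slice (PySem.Str.lower text) none (some 2000)) with
  | some p => rfl
  | none => rfl

-- ===== VERDICT (by name: the statement is the Claim_ definition above) =====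
theorem detect_country_spec : Claim_equal_detect_country := by
  intro domain text _
  unfold Spec_detect_country detect_country detect_country_alt
  rw [pv_tld_eq, pv_phase2]
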